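-- pv_equiv track=rewrite | github.com/837087012/stack | 01.py | remove1
-- ===== SOURCE A (Python) =====
-- def remove1(nums,target):  #去目标变量，返回不重复的值
--     fast=0
--     slow=0
--     while fast<len(nums):
--         if nums[fast]==target:
--             fast+=1
--         else:
--             nums[slow]=nums[fast]
--             slow+=1
--             fast+=1
--     return slow,nums[:slow]
-- ===== SOURCE B (Python) =====
-- def remove1(nums, target):
--     kept = [x for x in nums if x != target]
--     n = len(kept)
--     nums[:n] = kept
--     return n, nums[:n]
-- ===== Notes on version B (the rewrite author's own statement) =====
-- stated objective: simpler
-- what changed: Replaces the slow/fast two-pointer in-place compaction with a filter comprehension building the kept list, then a slice write-back; the return value is (len(kept), kept).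
import Mathlib
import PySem

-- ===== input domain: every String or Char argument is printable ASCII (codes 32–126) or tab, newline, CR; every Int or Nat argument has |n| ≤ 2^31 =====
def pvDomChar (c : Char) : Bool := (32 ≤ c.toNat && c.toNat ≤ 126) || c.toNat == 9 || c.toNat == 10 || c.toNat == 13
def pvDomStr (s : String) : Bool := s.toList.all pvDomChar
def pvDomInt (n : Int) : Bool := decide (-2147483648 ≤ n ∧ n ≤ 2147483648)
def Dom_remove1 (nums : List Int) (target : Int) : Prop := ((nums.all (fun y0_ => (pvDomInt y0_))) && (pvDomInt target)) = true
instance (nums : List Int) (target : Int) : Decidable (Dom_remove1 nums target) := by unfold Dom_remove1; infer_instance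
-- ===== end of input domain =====

-- B replaces A's slow/fast two-pointer in-place compaction by a filter pass plus write-back;
-- the proof shows the return values agree (B also performs the same visible mutation in Python).

-- ===== PORT A =====
-- the while loop: fast scans, slow writes non-target elements back into nums
def remove1Loop (nums : List Int) (target : Int) (fast slow : Nat) : Nat × List Int :=
  if h : fast < nums.length then
    if nums[fast] == target then
      remove1Loop nums target (fast + 1) slow
    else
      remove1Loop (nums.set slow nums[fast]) target (fast + 1) (slow + 1)
  else
    (slow, nums)
termination_by nums.length - fast
decreasing_by all_goals simp_all; omega

def remove1 (nums : List Int) (target : Int) : Int × List Int :=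
  let r := remove1Loop nums target 0 0
  -- nums[:slow] with slow = r.1 ≥ 0: Python's nonnegative-bound slice is List.take
  (Int.ofNat r.1, r.2.take r.1)

-- ===== PORT B =====
def remove1_alt (nums : List Int) (target : Int) : Int × List Int :=
  let kept := nums.filter (fun x => x != target)
  (Int.ofNat kept.length, kept)

-- ===== PRECONDITION & SPEC =====
def Spec_remove1 (nums : List Int) (target : Int) (out : Int × List Int) : Prop := out = remove1_alt nums target
instance (nums : List Int) (target : Int) (out : Int × List Int) : Decidable (Spec_remove1 nums target out) := by unfold Spec_remove1; infer_instance

-- ===== CLAIM (what is proved, stated in full; the proofs are below) =====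
def Claim_equal_remove1 : Prop := ∀ (nums : List Int) (target : Int), Dom_remove1 nums target → Spec_remove1 nums target (remove1 nums target)

-- ===== LEMMAS AND PROOFS =====

-- loop invariant: the count returned is slow + #(non-target elements still to scan),
-- and taking that many elements of the final array yields the compacted prefix so far
-- followed by the filtered remainder.
theorem remove1Loop_spec (target : Int) (nums : List Int) (fast slow : Nat)
    (hsf : slow ≤ fast) :
    (remove1Loop nums target fast slow).1
      = slow + ((nums.drop fast).filter (fun x => x != target)).length ∧
    (remove1Loop nums target fast slow).2.take (remove1Loop nums target fast slow).1
      = nums.take slow ++ (nums.drop fast).filter (fun x => x != target) := by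
  fun_induction remove1Loop nums target fast slow with
  | case1 nums fast slow h heq ih =>
    have ih := ih (Nat.le_succ_of_le hsf)
    have hfc : (nums.drop fast).filter (fun x => x != target)
        = (nums.drop (fast + 1)).filter (fun x => x != target) := by
      rw [List.drop_eq_getElem_cons h, List.filter_cons]
      simp [bne, heq]
    rw [hfc]; exact ih
  | case2 nums fast slow h heq ih =>
    have hslow : slow < nums.length := Nat.lt_of_le_of_lt hsf h
    have ih := ih (Nat.succ_le_succ hsf)
    have hfc : (nums.drop fast).filter (fun x => x != target)
        = nums[fast] :: (nums.drop (fast + 1)).filter (fun x => x != target) := by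
      rw [List.drop_eq_getElem_cons h, List.filter_cons]
      simp [bne, heq]
    have hdropset : (nums.set slow nums[fast]).drop (fast + 1) = nums.drop (fast + 1) := by
      rw [List.drop_set, if_pos (Nat.lt_succ_of_le hsf)]
    have hset : nums.set slow nums[fast]
        = nums.take slow ++ nums[fast] :: nums.drop (slow + 1) := by
      rw [List.set_eq_take_append_cons_drop, if_pos hslow]
    have htakeset : (nums.set slow nums[fast]).take (slow + 1)
        = nums.take slow ++ [nums[fast]] := by
      rw [hset, List.take_append]
      simp [List.take_take, List.length_take, Nat.min_eq_left (Nat.le_of_lt hslow)]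
    rw [hfc]
    refine ⟨?_, ?_⟩
    · rw [ih.1, hdropset]; simp; omega
    · rw [ih.2, hdropset, htakeset]; simp
  | case3 nums fast slow h =>
    have : nums.drop fast = [] := List.drop_eq_nil_of_le (by omega)
    simp [this]

-- ===== VERDICT (by name: the statement is the Claim_ definition above) =====
theorem remove1_spec : Claim_equal_remove1 := by
  intro nums target _
  unfold Spec_remove1 remove1 remove1_alt
  have h := remove1Loop_spec target nums 0 0 (Nat.le_refl 0)
  simp only [List.drop_zero, List.take_zero, List.nil_append] at h
  have h1 : (remove1Loop nums target 0 0).1 = (nums.filter (fun x => x != target)).length := by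
    simpa using h.1
  show (Int.ofNat (remove1Loop nums target 0 0).1,
        (remove1Loop nums target 0 0).2.take (remove1Loop nums target 0 0).1)
      = (Int.ofNat (nums.filter (fun x => x != target)).length, nums.filter (fun x => x != target))
  rw [Prod.mk.injEq]
  exact ⟨congrArg Int.ofNat h1, h.2⟩
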